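-- pv_equiv track=rewrite | github.com/paiml/depyler | examples/hard_string_interweave.py | weave_with_separator
-- ===== SOURCE A (Python) =====
-- def weave_with_separator(s1: str, s2: str, sep: str) -> str:
--     """Interweave two strings with a separator between each pair."""
--     result: str = ""
--     len1: int = len(s1)
--     len2: int = len(s2)
--     max_len: int = len1
--     if len2 > max_len:
--         max_len = len2
--     i: int = 0
--     while i < max_len:
--         if i > 0:
--             result = result + sep
--         if i < len1:
--             result = result + s1[i]
--         if i < len2:
--             result = result + s2[i]
--         i = i + 1
--     return result
-- ===== SOURCE B (Python) =====
-- def weave_with_separator(s1: str, s2: str, sep: str) -> str: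
--     """Interweave two strings with a separator between each pair."""
--     m = min(len(s1), len(s2))
--     paired = [a + b for a, b in zip(s1, s2)]
--     tail = s1[m:] or s2[m:]
--     return sep.join(paired + list(tail))
-- ===== Notes on version B (the rewrite author's own statement) =====
-- stated objective: faster
-- what changed: Replaced the single index loop with three per-step bounds checks and repeated string concatenation by a two-phase decomposition: a zip over the common prefix building two-char pieces, then the leftover suffix of the longer string taken wholesale by one slice, joined once with sep.
import Mathlib
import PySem

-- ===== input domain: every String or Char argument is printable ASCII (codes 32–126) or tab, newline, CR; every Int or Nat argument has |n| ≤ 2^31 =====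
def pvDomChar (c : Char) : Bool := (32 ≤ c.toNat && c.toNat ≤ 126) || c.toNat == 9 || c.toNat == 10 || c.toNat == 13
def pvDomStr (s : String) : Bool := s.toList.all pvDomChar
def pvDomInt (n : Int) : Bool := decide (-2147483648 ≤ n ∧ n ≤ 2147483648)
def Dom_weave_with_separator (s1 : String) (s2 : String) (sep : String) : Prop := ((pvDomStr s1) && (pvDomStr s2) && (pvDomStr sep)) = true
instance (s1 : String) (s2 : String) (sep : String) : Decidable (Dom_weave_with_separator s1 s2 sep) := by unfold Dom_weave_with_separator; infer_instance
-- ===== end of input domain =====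

-- B replaces A's index loop (three guarded concatenations per step) by two phases: zip over
-- the common prefix building two-char pieces, then the sliced leftover suffix, joined once with sep (faster: no repeated concatenation).


-- ===== PORT A =====
-- the while loop of A: index i counts up to max_len, appending sep (for i > 0)
-- and the guarded characters s1[i], s2[i] to the accumulated result
def weaveLoopA (c1 c2 sepL : List Char) (len1 len2 maxLen : Nat) (i : Nat)
    (result : List Char) : List Char :=
  if _h : i < maxLen then
    let r1 := if i > 0 then result ++ sepL else result
    let r2 := if i < len1 then r1 ++ [c1.getD i ' '] else r1
    let r3 := if i < len2 then r2 ++ [c2.getD i ' '] else r2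
    weaveLoopA c1 c2 sepL len1 len2 maxLen (i + 1) r3
  else result
termination_by maxLen - i

def weave_with_separator (s1 : String) (s2 : String) (sep : String) : String :=
  let c1 := s1.toList
  let c2 := s2.toList
  let len1 := c1.length
  let len2 := c2.length
  let maxLen := if len2 > len1 then len2 else len1
  String.mk (weaveLoopA c1 c2 sep.toList len1 len2 maxLen 0 [])

-- ===== PORT B =====
-- two phases: paired = [a+b for a,b in zip(s1,s2)]; tail = s1[m:] or s2[m:]; sep.join(paired + list(tail))
def weave_with_separator_alt (s1 : String) (s2 : String) (sep : String) : String :=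
  let c1 := s1.toList
  let c2 := s2.toList
  let m := min c1.length c2.length
  let paired := List.zipWith (fun a b => [a, b]) c1 c2
  let t1 := c1.drop m
  let tail := if t1 ≠ [] then t1 else c2.drop m
  String.mk (List.intercalate sep.toList (paired ++ tail.map (fun c => [c])))

-- ===== PRECONDITION & SPEC =====
def Spec_weave_with_separator (s1 : String) (s2 : String) (sep : String) (out : String) : Prop := out = weave_with_separator_alt s1 s2 sep
instance (s1 : String) (s2 : String) (sep : String) (out : String) : Decidable (Spec_weave_with_separator s1 s2 sep out) := by unfold Spec_weave_with_separator; infer_instance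

-- ===== CLAIM =====
def Claim_equal_weave_with_separator : Prop := ∀ (s1 : String) (s2 : String) (sep : String), Dom_weave_with_separator s1 s2 sep → Spec_weave_with_separator s1 s2 sep (weave_with_separator s1 s2 sep)

-- ===== LEMMAS AND PROOFS =====

-- proof-side description of the chunk sequence A's loop produces
def weaveChunks : List Char → List Char → List (List Char)
  | [], [] => []
  | a :: as, [] => [a] :: weaveChunks as []
  | [], b :: bs => [b] :: weaveChunks [] bs
  | a :: as, b :: bs => [a, b] :: weaveChunks as bs

def joinTail (sepL : List Char) (l : List (List Char)) : List Char :=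
  (l.map (fun ch => sepL ++ ch)).flatten

lemma intercalate_eq_joinTail (sepL x : List Char) (l : List (List Char)) :
    List.intercalate sepL (x :: l) = x ++ joinTail sepL l := by
  induction l generalizing x with
  | nil => simp [List.intercalate, joinTail]
  | cons y l ih =>
    have h1 : List.intercalate sepL (x :: y :: l) = x ++ sepL ++ List.intercalate sepL (y :: l) := by
      simp [List.intercalate, List.intersperse]
    rw [h1, ih y]
    simp [joinTail]

lemma weaveChunks_drop_step (c1 c2 : List Char) (i : Nat)
    (h : i < c1.length ∨ i < c2.length) :
    weaveChunks (c1.drop i) (c2.drop i) =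
      ((if i < c1.length then [c1.getD i ' '] else []) ++
       (if i < c2.length then [c2.getD i ' '] else [])) ::
      weaveChunks (c1.drop (i + 1)) (c2.drop (i + 1)) := by
  by_cases h1 : i < c1.length <;> by_cases h2 : i < c2.length
  · rw [List.drop_eq_getElem_cons h1, List.drop_eq_getElem_cons h2]
    simp only [weaveChunks, if_pos h1, if_pos h2, List.getD_eq_getElem _ _ h1,
      List.getD_eq_getElem _ _ h2, List.cons_append, List.nil_append]
  · rw [List.drop_eq_getElem_cons h1, List.drop_of_length_le (by omega : c2.length ≤ i),
        List.drop_of_length_le (by omega : c2.length ≤ i + 1)]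
    simp only [weaveChunks, if_pos h1, if_neg h2, List.getD_eq_getElem _ _ h1,
      List.append_nil]
  · rw [List.drop_eq_getElem_cons h2, List.drop_of_length_le (by omega : c1.length ≤ i),
        List.drop_of_length_le (by omega : c1.length ≤ i + 1)]
    simp only [weaveChunks, if_pos h2, if_neg h1, List.getD_eq_getElem _ _ h2,
      List.nil_append]
  · omega

lemma weaveLoopA_ge_one (c1 c2 sepL : List Char) (maxLen : Nat)
    (hmax : maxLen = max c1.length c2.length) :
    ∀ (i : Nat) (acc : List Char), 1 ≤ i →
      weaveLoopA c1 c2 sepL c1.length c2.length maxLen i acc =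
        acc ++ joinTail sepL (weaveChunks (c1.drop i) (c2.drop i)) := by
  intro i
  induction hn : maxLen - i using Nat.strong_induction_on generalizing i with
  | _ n ih =>
    intro acc hi
    rw [weaveLoopA]
    by_cases h : i < maxLen
    · simp only [h, dif_pos]
      have hor : i < c1.length ∨ i < c2.length := by omega
      rw [ih (maxLen - (i + 1)) (by omega) (i + 1) rfl _ (by omega)]
      rw [weaveChunks_drop_step c1 c2 i hor]
      simp only [joinTail, List.map_cons, List.flatten_cons]
      have : 0 < i := hi
      by_cases h1 : i < c1.length <;> by_cases h2 : i < c2.length <;>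
        simp [h1, h2, this, List.append_assoc]
    · simp only [h, dif_neg, not_false_iff]
      rw [List.drop_of_length_le (by omega : c1.length ≤ i),
          List.drop_of_length_le (by omega : c2.length ≤ i)]
      simp only [weaveChunks, joinTail, List.map_nil, List.flatten_nil, List.append_nil]

lemma loop_eq_chunks (s1 s2 sep : String) :
    weave_with_separator s1 s2 sep =
      String.mk (List.intercalate sep.toList (weaveChunks s1.toList s2.toList)) := by
  unfold weave_with_separator
  simp only
  set c1 := s1.toList
  set c2 := s2.toList
  set sepL := sep.toList
  have hmax : (if c2.length > c1.length then c2.length else c1.length) = max c1.length c2.length := by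
    split <;> omega
  rw [hmax]
  congr 1
  by_cases h0 : max c1.length c2.length = 0
  · have h1 : c1 = [] := List.eq_nil_of_length_eq_zero (by omega)
    have h2 : c2 = [] := List.eq_nil_of_length_eq_zero (by omega)
    rw [weaveLoopA]
    simp [h1, h2, weaveChunks, List.intercalate]
  · rw [weaveLoopA]
    have hlt : 0 < max c1.length c2.length := by omega
    simp only [hlt, dif_pos]
    have hor : 0 < c1.length ∨ 0 < c2.length := by omega
    rw [weaveLoopA_ge_one c1 c2 sepL _ rfl 1 _ (le_refl 1)]
    have := weaveChunks_drop_step c1 c2 0 hor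
    simp only [List.drop_zero] at this
    rw [this, intercalate_eq_joinTail]
    by_cases h1 : 0 < c1.length <;> by_cases h2 : 0 < c2.length <;>
      simp [h1, h2]

lemma weaveChunks_nil_right (l : List Char) :
    weaveChunks l [] = l.map (fun c => [c]) := by
  induction l with
  | nil => simp [weaveChunks]
  | cons a as ih => simp [weaveChunks, ih]

lemma weaveChunks_nil_left (l : List Char) :
    weaveChunks [] l = l.map (fun c => [c]) := by
  induction l with
  | nil => simp [weaveChunks]
  | cons a as ih => simp [weaveChunks, ih]

-- A's chunk sequence factors as B's two phases: zipped pairs, then the leftover suffix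
lemma weaveChunks_eq_phases (c1 c2 : List Char) :
    weaveChunks c1 c2 =
      List.zipWith (fun a b => [a, b]) c1 c2 ++
        (if c1.drop (min c1.length c2.length) ≠ [] then c1.drop (min c1.length c2.length)
         else c2.drop (min c1.length c2.length)).map (fun c => [c]) := by
  induction c1 generalizing c2 with
  | nil =>
    simp [weaveChunks_nil_left]
  | cons a as ih =>
    cases c2 with
    | nil =>
      simp [weaveChunks_nil_right]
    | cons b bs =>
      have hmin : min (a :: as).length (b :: bs).length = min as.length bs.length + 1 := by
        simp [Nat.succ_min_succ]
      rw [hmin]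
      simp only [weaveChunks, List.zipWith_cons_cons, List.drop_succ_cons, List.cons_append,
        List.cons.injEq, true_and]
      exact ih bs

lemma weave_eq (s1 s2 sep : String) :
    weave_with_separator s1 s2 sep = weave_with_separator_alt s1 s2 sep := by
  rw [loop_eq_chunks]
  unfold weave_with_separator_alt
  simp only
  rw [weaveChunks_eq_phases]

-- ===== VERDICT =====
theorem weave_with_separator_spec : Claim_equal_weave_with_separator := by
  intro s1 s2 sep _
  unfold Spec_weave_with_separator
  exact weave_eq s1 s2 sep
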